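-- pv_equiv track=rewrite | github.com/mattjm/Fujitsu_Broadlink | broadfromhexcode.py | calc_microsecond_timings
-- ===== SOURCE A (Python) =====
-- BIT_MARK = 420#420
--
-- ONE_SPACE = 1210#1210
--
-- ZERO_SPACE = 420 #420
--
-- def calc_microsecond_timings(timings):
--     timings_out = []
--     for byte in timings:
--         singleBits = f'{byte:08b}'
--         for oneBit in singleBits:
--            timings_out.append(BIT_MARK)
--            if oneBit == '1':
--             timings_out.append(ONE_SPACE)
--            else:
--             timings_out.append(ZERO_SPACE)
--     return timings_out
-- ===== SOURCE B (Python) =====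
-- BIT_MARK = 420
--
-- ONE_SPACE = 1210
--
-- ZERO_SPACE = 420
--
--
-- def calc_microsecond_timings(timings):
--     bits = ''.join(format(byte, '08b') for byte in timings)
--     out = [BIT_MARK, ZERO_SPACE] * len(bits)
--     for i, c in enumerate(bits):
--         if c == '1':
--             out[2 * i + 1] = ONE_SPACE
--     return out
-- ===== Notes on version B (the rewrite author's own statement) =====
-- stated objective: alternative
-- what changed: Instead of nested loops appending a mark and a branch-chosen space per bit, B joins all formatted bytes into one flat bit string, preallocates the default [BIT_MARK, ZERO_SPACE] pattern for its full length, and overwrites only the positions after one-bits with ONE_SPACE by index.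
import Mathlib
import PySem

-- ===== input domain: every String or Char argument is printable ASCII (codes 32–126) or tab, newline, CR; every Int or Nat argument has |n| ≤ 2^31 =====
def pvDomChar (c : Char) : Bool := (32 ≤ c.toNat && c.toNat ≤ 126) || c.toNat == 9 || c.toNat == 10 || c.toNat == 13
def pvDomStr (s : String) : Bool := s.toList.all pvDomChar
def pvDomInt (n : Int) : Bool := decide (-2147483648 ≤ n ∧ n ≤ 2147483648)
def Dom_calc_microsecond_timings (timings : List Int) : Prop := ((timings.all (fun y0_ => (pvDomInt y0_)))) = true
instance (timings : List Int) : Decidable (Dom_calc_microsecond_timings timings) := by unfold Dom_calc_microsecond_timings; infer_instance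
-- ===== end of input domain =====

-- B joins all formatted bytes into one flat bit string, preallocates the default
-- [mark, zero-space] pattern for its whole length and overwrites only the one-bit
-- positions by index; equal return values on all inputs.

-- ===== PORT A =====
-- hand port of the digit part of Python's f'{n:08b}' (binary digits of |n|, no sign):
-- exact: most-significant digit first, single '0' for 0
def toBin (n : Nat) : List Char :=
  if n < 2 then [if n = 1 then '1' else '0']
  else toBin (n / 2) ++ [if n % 2 = 1 then '1' else '0']

-- exact: zero-pad on the left to width w
def padZeros (w : Nat) (l : List Char) : List Char := List.replicate (w - l.length) '0' ++ l

-- exact port of f'{n:08b}' / format(n, '08b'): sign (inside the width) then zero-padded digits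
def pyFormat08b (n : Int) : List Char :=
  if n < 0 then '-' :: padZeros 7 (toBin n.natAbs) else padZeros 8 (toBin n.toNat)

def calc_microsecond_timings (timings : List Int) : List Int :=
  timings.foldl (fun acc byte =>
    (pyFormat08b byte).foldl (fun a oneBit =>
      (a ++ [(420 : Int)]) ++ [if oneBit == '1' then (1210 : Int) else 420]) acc) []

-- ===== PORT B =====
def calc_microsecond_timings_alt (timings : List Int) : List Int :=
  -- bits = ''.join(format(byte, '08b') for byte in timings)
  let bits : List Char := (timings.map pyFormat08b).flatten
  -- out = [BIT_MARK, ZERO_SPACE] * len(bits); overwrite out[2*i+1] at the one bits.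
  -- the write index 2*i+1 is nonnegative and in range, so List.set is exact here
  (PySem.List.enumerate bits).foldl
    (fun out p => if p.2 == '1' then out.set (2 * p.1 + 1).toNat 1210 else out)
    ((List.replicate bits.length [(420 : Int), 420]).flatten)

-- ===== PRECONDITION & SPEC =====
def Spec_calc_microsecond_timings (timings : List Int) (out : List Int) : Prop := out = calc_microsecond_timings_alt timings
instance (timings : List Int) (out : List Int) : Decidable (Spec_calc_microsecond_timings timings out) := by unfold Spec_calc_microsecond_timings; infer_instance

-- ===== CLAIM (what is proved, stated in full; the proofs are below) =====
def Claim_equal_calc_microsecond_timings : Prop := ∀ (timings : List Int), Dom_calc_microsecond_timings timings → Spec_calc_microsecond_timings timings (calc_microsecond_timings timings)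

-- ===== LEMMAS AND PROOFS =====

-- the mark/space pair one formatted character contributes
def chunk (c : Char) : List Int := [420, if c == '1' then 1210 else 420]

theorem flatMap_flatten_chunk (ts : List Int) :
    ts.flatMap (fun b => (pyFormat08b b).flatMap chunk)
      = ((ts.map pyFormat08b).flatten).flatMap chunk := by
  induction ts with
  | nil => rfl
  | cons b bs ihb => simp [List.flatMap_cons, List.flatMap_append, ihb]

theorem a_eq_flatMap (timings : List Int) :
    calc_microsecond_timings timings
      = ((timings.map pyFormat08b).flatten).flatMap chunk := by
  rw [calc_microsecond_timings]
  have hstep : ∀ (b : Int) (acc : List Int),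
      (pyFormat08b b).foldl (fun a oneBit =>
        (a ++ [(420 : Int)]) ++ [if oneBit == '1' then (1210 : Int) else 420]) acc
      = acc ++ (pyFormat08b b).flatMap chunk := by
    intro b acc
    have : (fun (a : List Int) (oneBit : Char) =>
        (a ++ [(420 : Int)]) ++ [if oneBit == '1' then (1210 : Int) else 420])
        = fun a c => a ++ chunk c := by
      funext a c; simp [chunk]
    rw [this, PySem.List.foldl_append_eq_flatMap]
  have : timings.foldl (fun acc byte =>
      (pyFormat08b byte).foldl (fun a oneBit =>
        (a ++ [(420 : Int)]) ++ [if oneBit == '1' then (1210 : Int) else 420]) acc) []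
      = timings.foldl (fun acc byte => acc ++ (pyFormat08b byte).flatMap chunk) [] := by
    apply List.foldl_ext; intro acc b _; exact hstep b acc
  rw [this, PySem.List.foldl_append_eq_flatMap, List.nil_append,
    flatMap_flatten_chunk]

-- the B loop, generalized over a processed prefix P (length 2·k, k = the enumerate start)
theorem b_loop (cs : List Char) (k : Nat) (P : List Int) (hP : P.length = 2 * k) :
    (PySem.List.enumerate cs (k : Int)).foldl
      (fun out p => if p.2 == '1' then out.set (2 * p.1 + 1).toNat 1210 else out)
      (P ++ (List.replicate cs.length [(420 : Int), 420]).flatten)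
    = P ++ cs.flatMap chunk := by
  induction cs generalizing k P with
  | nil => simp [PySem.List.enumerate]
  | cons c cs ih =>
    rw [PySem.List.enumerate_cons, List.foldl_cons, List.length_cons,
      List.replicate_succ, List.flatten_cons]
    have hidx : (2 * (k : Int) + 1).toNat = 2 * k + 1 := by omega
    have hset : ∀ x : Int,
        (P ++ ([420, 420] ++ (List.replicate cs.length [(420 : Int), 420]).flatten)).set
            (2 * k + 1) x
        = (P ++ [420, x]) ++ (List.replicate cs.length [(420 : Int), 420]).flatten := by
      intro x
      rw [List.set_append_right _ _ (by omega)]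
      have : 2 * k + 1 - P.length = 1 := by omega
      rw [this]
      simp
    have hgoal : ∀ out', out' = (P ++ chunk c)
          ++ (List.replicate cs.length [(420 : Int), 420]).flatten →
        (PySem.List.enumerate cs ((k : Int) + 1)).foldl
          (fun out p => if p.2 == '1' then out.set (2 * p.1 + 1).toNat 1210 else out) out'
        = P ++ (c :: cs).flatMap chunk := by
      intro out' hout
      have hk1 : ((k : Int) + 1) = ((k + 1 : Nat) : Int) := by push_cast; ring
      rw [hout, hk1, ih (k + 1) (P ++ chunk c) (by simp [chunk]; omega)]
      simp [chunk]
    by_cases h1 : c == '1'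
    · rw [if_pos h1, hidx, hgoal _ (by rw [hset]; simp [chunk, h1])]
    · rw [if_neg h1, hgoal _ (by simp [chunk, h1])]

theorem b_eq_flatMap (timings : List Int) :
    calc_microsecond_timings_alt timings
      = ((timings.map pyFormat08b).flatten).flatMap chunk := by
  rw [calc_microsecond_timings_alt]
  exact b_loop _ 0 [] rfl

-- ===== VERDICT (by name: the statement is the Claim_ definition above) =====
theorem calc_microsecond_timings_spec : Claim_equal_calc_microsecond_timings := by
  intro timings _
  unfold Spec_calc_microsecond_timings
  rw [a_eq_flatMap, b_eq_flatMap]
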